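-- pv_equiv track=rewrite | github.com/devuming/al_python | 2023.02/프로그래머스_무인도여행_BFS.py | solution
-- ===== SOURCE A (Python) =====
-- from collections import deque
--
-- def bfs(maps, visited, x, y):
--     dirs = [(0, -1), (0, 1), (-1, 0), (1, 0)]   # 상하좌우
--
--     queue = deque()
--     queue.append((x, y))
--     visited[x][y] = True
--     count = 0
--
--     while queue:
--         now_x, now_y = queue.popleft()
--         count += int(maps[now_x][now_y])
--
--         for dx, dy in dirs:
--             nx = now_x + dx
--             ny = now_y + dy
--
--             if nx >= 0 and nx < len(maps) and ny >= 0 and ny < len(maps[0]):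
--                 if maps[nx][ny] == 'X' or visited[nx][ny]:
--                     continue
--                 queue.append((nx, ny))
--                 visited[nx][ny] = True
--
--     return count
--
-- def solution(maps):
--     answer = []
--     visited = [[False] * len(maps[0]) for _ in range(len(maps))]
--
--     for i in range(len(maps)):
--         for j in range(len(maps[0])):
--             if maps[i][j] != 'X' and not visited[i][j]:
--                 answer.append(bfs(maps, visited, i, j))
--
--     return sorted(answer)if len(answer) > 0 else [-1]
-- ===== SOURCE B (Python) =====
-- def solution(maps):
--     rows = len(maps)
--     cols = len(maps[0]) if maps else 0
--     n = rows * cols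
--
--     # union-find with union-by-min (parent[x] <= x always), no path compression
--     parent = list(range(n))
--
--     def find(x):
--         while parent[x] != x:
--             x = parent[x]
--         return x
--
--     def union(a, b):
--         ra = find(a)
--         rb = find(b)
--         if ra < rb:
--             parent[rb] = ra
--         elif rb < ra:
--             parent[ra] = rb
--
--     for i in range(rows):
--         for j in range(cols):
--             if maps[i][j] != 'X':
--                 if j + 1 < cols and maps[i][j + 1] != 'X':
--                     union(i * cols + j, i * cols + j + 1)
--                 if i + 1 < rows and maps[i + 1][j] != 'X':
--                     union(i * cols + j, (i + 1) * cols + j)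
--
--     sums = {}
--     for i in range(rows):
--         for j in range(cols):
--             if maps[i][j] != 'X':
--                 r = find(i * cols + j)
--                 sums[r] = sums.get(r, 0) + int(maps[i][j])
--
--     vals = list(sums.values())
--     return sorted(vals) if vals else [-1]
-- ===== Notes on version B (the rewrite author's own statement) =====
-- stated objective: alternative
-- what changed: Replaces A's per-seed BFS flood fill (explicit queue + visited matrix) by a two-pass union-find over flat cell indices: one pass unions each land cell with its right/down land neighbours, a second pass accumulates each cell's digit value into a dict keyed by its root; returns the sorted per-component sums, or [-1] when there is no land.
import Mathlib
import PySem

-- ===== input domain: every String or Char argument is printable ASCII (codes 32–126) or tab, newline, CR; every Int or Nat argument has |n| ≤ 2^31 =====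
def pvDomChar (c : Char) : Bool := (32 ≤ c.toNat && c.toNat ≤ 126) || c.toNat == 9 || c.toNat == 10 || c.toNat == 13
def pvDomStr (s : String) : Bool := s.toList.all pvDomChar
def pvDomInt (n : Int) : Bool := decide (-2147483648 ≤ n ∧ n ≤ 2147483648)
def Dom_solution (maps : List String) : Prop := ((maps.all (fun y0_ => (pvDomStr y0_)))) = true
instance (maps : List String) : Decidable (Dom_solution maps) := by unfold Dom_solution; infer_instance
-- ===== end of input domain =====

-- B replaces A's per-seed BFS flood fill by a two-pass union-find over flat cell
-- indices (alternative algorithm of similar cost); both accumulate the digit values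
-- of each connected land component and return the sorted list of sums, or [-1].

-- Shared grid-reading helpers (both Pythons read maps[i][j] and int(maps[i][j]) identically)
def gCols (maps : List String) : Nat := (PySem.List.pyGetD maps 0 "").toList.length  -- A: len(maps[0]), only reached when maps ≠ []; B: len(maps[0]) if maps else 0 (exact: default "" gives 0)
def gCell (maps : List String) (i j : Int) : Char :=
  PySem.List.pyGetD (PySem.List.pyGetD maps i "").toList j 'X'  -- maps[i][j]; defaults unreachable: both programs index in bounds under Pre_
def cellVal (c : Char) : Int := (PySem.Int.ofChars? [c]).getD 0  -- int(maps[i][j]); default unreachable: Pre_ makes land cells digits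

-- ===== PORT A =====
def getVis (v : List (List Bool)) (i j : Int) : Bool :=
  PySem.List.pyGetD (PySem.List.pyGetD v i []) j false  -- visited[i][j] (in bounds wherever read)
def setVis (v : List (List Bool)) (i j : Int) : List (List Bool) :=
  PySem.List.pySetD v i (PySem.List.pySetD (PySem.List.pyGetD v i []) j true)  -- visited[i][j] = True

def bfsDirs : List (Int × Int) := [(0, -1), (0, 1), (-1, 0), (1, 0)]

-- the 'while queue' loop; fuel rows*cols+1 is exact: each iteration pops one cell, and every
-- enqueue marks a distinct unvisited cell visited, so there are at most rows*cols+1 pops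
def bfsLoop (maps : List String) : Nat → List (Int × Int) → List (List Bool) → Int → Int × List (List Bool)
  | _, [], visited, count => (count, visited)
  | 0, _ :: _, visited, count => (count, visited)  -- unreachable under Pre_ (fuel never runs out)
  | fuel + 1, (nx, ny) :: rest, visited, count =>
      let count' := count + cellVal (gCell maps nx ny)
      let st := bfsDirs.foldl (fun (st : List (Int × Int) × List (List Bool)) d =>
        let x := nx + d.1
        let y := ny + d.2
        if 0 ≤ x ∧ x < (maps.length : Int) ∧ 0 ≤ y ∧ y < (gCols maps : Int) then
          if gCell maps x y = 'X' ∨ getVis st.2 x y = true then st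
          else (st.1 ++ [(x, y)], setVis st.2 x y)
        else st) (rest, visited)
      bfsLoop maps fuel st.1 st.2 count'

def bfsA (maps : List String) (visited : List (List Bool)) (x y : Int) : Int × List (List Bool) :=
  bfsLoop maps (maps.length * gCols maps + 1) [(x, y)] (setVis visited x y) 0

def solution (maps : List String) : List Int :=
  let visited0 : List (List Bool) := List.replicate maps.length (List.replicate (gCols maps) false)
  let res := (List.range maps.length).foldl (fun (st : List Int × List (List Bool)) (i : Nat) =>
    (List.range (gCols maps)).foldl (fun (st : List Int × List (List Bool)) (j : Nat) =>
      if gCell maps i j ≠ 'X' ∧ getVis st.2 i j = false then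
        let r := bfsA maps st.2 i j
        (st.1 ++ [r.1], r.2)
      else st) st) ([], visited0)
  if 0 < res.1.length then PySem.List.sorted res.1 (fun x => x) false else [-1]

-- ===== PORT B =====
-- find(x): while parent[x] != x: x = parent[x].  Fuel x+1 is exact: union-by-min keeps
-- parent[x] ≤ x, so the chain strictly decreases and has at most x+1 nodes.
def findUF (parent : List Nat) : Nat → Nat → Nat
  | 0, x => x
  | f + 1, x =>
      let p := parent.getD x x
      if p = x then x else findUF parent f p

def ufFind (parent : List Nat) (x : Nat) : Nat := findUF parent (x + 1) x

def ufUnion (parent : List Nat) (a b : Nat) : List Nat :=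
  let ra := ufFind parent a
  let rb := ufFind parent b
  if ra < rb then parent.set rb ra
  else if rb < ra then parent.set ra rb
  else parent

def solution_alt (maps : List String) : List Int :=
  let rows := maps.length
  let cols := gCols maps
  let parent := (List.range rows).foldl (fun par (i : Nat) =>
    (List.range cols).foldl (fun (par : List Nat) (j : Nat) =>
      if gCell maps i j ≠ 'X' then
        let par' := if j + 1 < cols ∧ gCell maps i (j + 1) ≠ 'X'
          then ufUnion par (i * cols + j) (i * cols + j + 1) else par
        if i + 1 < rows ∧ gCell maps (i + 1) j ≠ 'X'
          then ufUnion par' (i * cols + j) ((i + 1) * cols + j) else par'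
      else par) par) (List.range (rows * cols))
  let sums := (List.range rows).foldl (fun (d : PySem.Dict Nat Int) (i : Nat) =>
    (List.range cols).foldl (fun (d : PySem.Dict Nat Int) (j : Nat) =>
      if gCell maps i j ≠ 'X' then
        let r := ufFind parent (i * cols + j)
        d.insert r (d.getD r 0 + cellVal (gCell maps i j))
      else d) d) PySem.Dict.empty
  let vals := sums.values
  if vals ≠ [] then PySem.List.sorted vals (fun x => x) false else [-1]

-- ===== PRECONDITION & SPEC =====
-- Pre_ excludes exactly the inputs where A raises: a row shorter than len(maps[0])
-- (IndexError when reached) and a scanned land cell that is not a decimal digit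
-- (int() → ValueError).
def Pre_solution (maps : List String) : Prop :=
  ((maps.all (fun s => decide (gCols maps ≤ s.toList.length) &&
    (s.toList.take (gCols maps)).all (fun c => c == 'X' || c.isDigit)))) = true
instance (maps : List String) : Decidable (Pre_solution maps) := by unfold Pre_solution; infer_instance
def pvWitness_solution : List String := ["9X", "15"]

def Spec_solution (maps : List String) (out : List Int) : Prop := out = solution_alt maps
instance (maps : List String) (out : List Int) : Decidable (Spec_solution maps out) := by unfold Spec_solution; infer_instance

-- ===== CLAIM (what is proved, stated in full; the proofs are below) =====
def Claim_equal_solution : Prop := ∀ (maps : List String), Dom_solution maps → Pre_solution maps → Spec_solution maps (solution maps)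

-- ===== LEMMAS AND PROOFS =====


-- ===== development =====







def pOK (N : Nat) (par : List Nat) : Prop :=
  par.length = N ∧ ∀ x, x < N → par.getD x x ≤ x

lemma findUF_succ (par : List Nat) (f x : Nat) :
    findUF par (f + 1) x = if par.getD x x = x then x else findUF par f (par.getD x x) := rfl

lemma getD_default_of_ge (par : List Nat) (x : Nat) (h : par.length ≤ x) : par.getD x x = x := by
  simp [List.getD_eq_getElem?_getD, List.getElem?_eq_none (by omega)]

lemma pOK_lt {N : Nat} {par : List Nat} (hp : pOK N par) {x : Nat}
    (hne : par.getD x x ≠ x) : par.getD x x < x ∧ x < N := by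
  rcases hp with ⟨hlen, hle⟩
  by_cases hx : x < N
  · exact ⟨lt_of_le_of_ne (hle x hx) hne, hx⟩
  · exact absurd (getD_default_of_ge par x (by omega)) hne

lemma findUF_fuel {N : Nat} {par : List Nat} (hp : pOK N par) :
    ∀ x f g, x < f → x < g → findUF par f x = findUF par g x := by
  intro x
  induction x using Nat.strong_induction_on with
  | _ x ih =>
    intro f g hf hg
    match f, g with
    | f + 1, g + 1 =>
      rw [findUF_succ, findUF_succ]
      by_cases h : par.getD x x = x
      · rw [if_pos h, if_pos h]
      · have hlt := (pOK_lt hp h).1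
        rw [if_neg h, if_neg h]
        exact ih _ hlt _ _ (by omega) (by omega)

lemma ufFind_step {N : Nat} {par : List Nat} (hp : pOK N par) {x : Nat}
    (hne : par.getD x x ≠ x) : ufFind par x = ufFind par (par.getD x x) := by
  have hlt := (pOK_lt hp hne).1
  show findUF par (x + 1) x = _
  rw [findUF_succ, if_neg hne]
  exact findUF_fuel hp _ _ _ (by omega) (by omega)

lemma ufFind_of_root {par : List Nat} {x : Nat} (h : par.getD x x = x) :
    ufFind par x = x := by rw [ufFind, findUF_succ, if_pos h]

lemma ufFind_le {N : Nat} {par : List Nat} (hp : pOK N par) (x : Nat) : ufFind par x ≤ x := by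
  induction x using Nat.strong_induction_on with
  | _ x ih =>
    by_cases h : par.getD x x = x
    · simp [ufFind_of_root h]
    · have hlt := (pOK_lt hp h).1
      rw [ufFind_step hp h]
      exact le_trans (ih _ hlt) (by omega)

lemma ufFind_isRoot {N : Nat} {par : List Nat} (hp : pOK N par) (x : Nat) :
    par.getD (ufFind par x) (ufFind par x) = ufFind par x := by
  induction x using Nat.strong_induction_on with
  | _ x ih =>
    by_cases h : par.getD x x = x
    · rw [ufFind_of_root h]; exact h
    · have hlt := (pOK_lt hp h).1
      rw [ufFind_step hp h]
      exact ih _ hlt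

lemma pOK_set {N : Nat} {par : List Nat} (hp : pOK N par) {ra rb : Nat}
    (hlt : ra < rb) (hbN : rb < N) : pOK N (par.set rb ra) := by
  rcases hp with ⟨hlen, hle⟩
  refine ⟨by simp [hlen], ?_⟩
  intro x hx
  rcases eq_or_ne x rb with heq | hne
  · subst heq
    rw [List.getD_eq_getElem?_getD, List.getElem?_set_self (by omega)]
    simpa using le_of_lt hlt
  · rw [List.getD_eq_getElem?_getD, List.getElem?_set_ne (by omega),
      ← List.getD_eq_getElem?_getD]
    exact hle x hx

lemma ufFind_set {N : Nat} {par : List Nat} (hp : pOK N par) {ra rb : Nat}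
    (hra : par.getD ra ra = ra) (hrb : par.getD rb rb = rb) (hlt : ra < rb) (hbN : rb < N) :
    ∀ x, ufFind (par.set rb ra) x = if ufFind par x = rb then ra else ufFind par x := by
  have hp' := pOK_set hp hlt hbN
  have hlen : par.length = N := hp.1
  have hget : ∀ x, (par.set rb ra).getD x x = if x = rb then ra else par.getD x x := by
    intro x
    rcases eq_or_ne x rb with heq | hne
    · subst heq
      rw [List.getD_eq_getElem?_getD, List.getElem?_set_self (by omega)]; simp
    · rw [List.getD_eq_getElem?_getD, List.getElem?_set_ne (by omega),
        ← List.getD_eq_getElem?_getD, if_neg hne]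
  intro x
  induction x using Nat.strong_induction_on with
  | _ x ih =>
    rcases eq_or_ne x rb with heq | hne
    · subst heq
      have h1 : (par.set x ra).getD x x = ra := by rw [hget]; simp
      rw [ufFind_step (N := N) hp' (x := x) (by rw [h1]; omega), h1, ih ra hlt,
        ufFind_of_root hra, if_neg (by omega), ufFind_of_root hrb, if_pos rfl]
    · have hgx : (par.set rb ra).getD x x = par.getD x x := by rw [hget, if_neg hne]
      by_cases hroot : par.getD x x = x
      · have hfx : ufFind par x = x := ufFind_of_root hroot
        rw [ufFind_of_root (hgx.trans hroot), hfx, if_neg hne]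
      · have hlt' := (pOK_lt hp hroot).1
        rw [ufFind_step (N := N) hp' (x := x) (by rw [hgx]; exact hroot), hgx,
          ufFind_step (N := N) hp hroot]
        exact ih _ hlt'

lemma ufUnion_spec {N : Nat} {par : List Nat} (hp : pOK N par) {a b : Nat}
    (ha : a < N) (hb : b < N) :
    pOK N (ufUnion par a b) ∧ ∀ x, ufFind (ufUnion par a b) x =
      if ufFind par x = ufFind par a ∨ ufFind par x = ufFind par b
      then min (ufFind par a) (ufFind par b) else ufFind par x := by
  have hra := ufFind_isRoot hp a
  have hrb := ufFind_isRoot hp b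
  have hraN : ufFind par a < N := lt_of_le_of_lt (ufFind_le hp a) ha
  have hrbN : ufFind par b < N := lt_of_le_of_lt (ufFind_le hp b) hb
  unfold ufUnion
  by_cases h1 : ufFind par a < ufFind par b
  · rw [if_pos h1]
    refine ⟨pOK_set hp h1 hrbN, fun x => ?_⟩
    rw [ufFind_set hp hra hrb h1 hrbN x]
    rcases eq_or_ne (ufFind par x) (ufFind par b) with heq | hne
    · rw [if_pos heq, if_pos (Or.inr heq), min_eq_left (le_of_lt h1)]
    · rw [if_neg hne]
      rcases eq_or_ne (ufFind par x) (ufFind par a) with heq2 | hne2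
      · rw [if_pos (Or.inl heq2), min_eq_left (le_of_lt h1), heq2]
      · rw [if_neg (by tauto)]
  · rw [if_neg h1]
    by_cases h2 : ufFind par b < ufFind par a
    · rw [if_pos h2]
      refine ⟨pOK_set hp h2 hraN, fun x => ?_⟩
      rw [ufFind_set hp hrb hra h2 hraN x]
      rcases eq_or_ne (ufFind par x) (ufFind par a) with heq | hne
      · rw [if_pos heq, if_pos (Or.inl heq), min_eq_right (le_of_lt h2)]
      · rw [if_neg hne]
        rcases eq_or_ne (ufFind par x) (ufFind par b) with heq2 | hne2
        · rw [if_pos (Or.inr heq2), min_eq_right (le_of_lt h2), heq2]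
        · rw [if_neg (by tauto)]
    · rw [if_neg h2]
      have hab : ufFind par a = ufFind par b := by omega
      refine ⟨hp, fun x => ?_⟩
      rcases eq_or_ne (ufFind par x) (ufFind par a) with heq | hne
      · rw [if_pos (Or.inl heq), heq, hab, min_self]
      · rw [if_neg (by rw [hab] at hne ⊢; tauto)]

def applyUnions (N : Nat) (es : List (Nat × Nat)) : List Nat :=
  es.foldl (fun par e => ufUnion par e.1 e.2) (List.range N)

def erel (es : List (Nat × Nat)) : Nat → Nat → Prop :=
  Relation.EqvGen (fun u v => (u, v) ∈ es)

lemma erel_nil {x y : Nat} : erel [] x y ↔ x = y := by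
  constructor
  · intro h
    induction h with
    | rel _ _ h => simp at h
    | refl => rfl
    | symm _ _ _ ih => omega
    | trans _ _ _ _ _ ih1 ih2 => omega
  · rintro rfl; exact Relation.EqvGen.refl x

lemma erel_mono {es es' : List (Nat × Nat)} (hsub : ∀ e ∈ es, e ∈ es') {x y : Nat}
    (h : erel es x y) : erel es' x y := by
  induction h with
  | rel a b h => exact Relation.EqvGen.rel _ _ (hsub _ h)
  | refl a => exact Relation.EqvGen.refl a
  | symm _ _ _ ih => exact Relation.EqvGen.symm _ _ ih
  | trans _ _ _ _ _ ih1 ih2 => exact Relation.EqvGen.trans _ _ _ ih1 ih2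

lemma erel_append_singleton {es : List (Nat × Nat)} {a b x y : Nat} :
    erel (es ++ [(a, b)]) x y ↔
      erel es x y ∨ (erel es x a ∧ erel es b y) ∨ (erel es x b ∧ erel es a y) := by
  have symm : ∀ {u v}, erel es u v → erel es v u := fun h => Relation.EqvGen.symm _ _ h
  have trans : ∀ {u v w}, erel es u v → erel es v w → erel es u w :=
    fun h1 h2 => Relation.EqvGen.trans _ _ _ h1 h2
  constructor
  · intro h
    induction h with
    | rel u v h =>
      rcases List.mem_append.mp h with h | h
      · exact Or.inl (Relation.EqvGen.rel _ _ h)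
      · simp at h
        exact Or.inr (Or.inl ⟨h.1 ▸ Relation.EqvGen.refl _, h.2 ▸ Relation.EqvGen.refl _⟩)
    | refl u => exact Or.inl (Relation.EqvGen.refl u)
    | symm u v _ ih =>
      rcases ih with h | ⟨h1, h2⟩ | ⟨h1, h2⟩
      · exact Or.inl (symm h)
      · exact Or.inr (Or.inr ⟨symm h2, symm h1⟩)
      · exact Or.inr (Or.inl ⟨symm h2, symm h1⟩)
    | trans u v w _ _ ih1 ih2 =>
      rcases ih1 with h | ⟨h1, h2⟩ | ⟨h1, h2⟩ <;>
        rcases ih2 with g | ⟨g1, g2⟩ | ⟨g1, g2⟩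
      · exact Or.inl (trans h g)
      · exact Or.inr (Or.inl ⟨trans h g1, g2⟩)
      · exact Or.inr (Or.inr ⟨trans h g1, g2⟩)
      · exact Or.inr (Or.inl ⟨h1, trans h2 g⟩)
      · exact Or.inl (trans (trans h1 (symm (trans h2 g1))) g2)
      · exact Or.inl (trans h1 g2)
      · exact Or.inr (Or.inr ⟨h1, trans h2 g⟩)
      · exact Or.inl (trans h1 g2)
      · exact Or.inl (trans (trans h1 (symm (trans h2 g1))) g2)
  · intro h
    have base : ∀ {u v}, erel es u v → erel (es ++ [(a, b)]) u v :=
      fun h => erel_mono (fun e he => List.mem_append.mpr (Or.inl he)) h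
    have hab : erel (es ++ [(a, b)]) a b :=
      Relation.EqvGen.rel _ _ (List.mem_append.mpr (Or.inr (by simp)))
    rcases h with h | ⟨h1, h2⟩ | ⟨h1, h2⟩
    · exact base h
    · exact Relation.EqvGen.trans _ _ _ (Relation.EqvGen.trans _ _ _ (base h1) hab) (base h2)
    · exact Relation.EqvGen.trans _ _ _
        (Relation.EqvGen.trans _ _ _ (base h1) (Relation.EqvGen.symm _ _ hab)) (base h2)

lemma applyUnions_spec {N : Nat} (es : List (Nat × Nat)) (hes : ∀ e ∈ es, e.1 < N ∧ e.2 < N) :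
    pOK N (applyUnions N es) ∧
      ∀ x y, ufFind (applyUnions N es) x = ufFind (applyUnions N es) y ↔ erel es x y := by
  induction es using List.reverseRecOn with
  | nil =>
    have hbase : pOK N (List.range N) := by
      refine ⟨List.length_range, fun x hx => ?_⟩
      rw [List.getD_eq_getElem?_getD, List.getElem?_range hx]; simp
    refine ⟨hbase, fun x y => ?_⟩
    have hfix : ∀ z, ufFind (List.range N) z = z := by
      intro z
      apply ufFind_of_root
      by_cases hz : z < N
      · rw [List.getD_eq_getElem?_getD, List.getElem?_range hz]; simp
      · exact getD_default_of_ge _ _ (by simp; omega)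
    simp only [applyUnions, List.foldl_nil]
    rw [hfix, hfix, erel_nil]
  | append_singleton es e ih =>
    obtain ⟨a, b⟩ := e
    have hes' : ∀ e ∈ es, e.1 < N ∧ e.2 < N := fun e he => hes e (by simp [he])
    obtain ⟨hp, hiff⟩ := ih hes'
    have haN : a < N := (hes (a, b) (by simp)).1
    have hbN : b < N := (hes (a, b) (by simp)).2
    obtain ⟨hp', hchar⟩ := ufUnion_spec hp haN hbN
    have happ : applyUnions N (es ++ [(a, b)]) = ufUnion (applyUnions N es) a b := by
      simp [applyUnions]
    rw [happ]
    refine ⟨hp', fun x y => ?_⟩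
    rw [hchar x, hchar y, erel_append_singleton]
    rw [← hiff x y, ← hiff x a, ← hiff b y, ← hiff x b, ← hiff a y]
    split_ifs <;> omega

-- ===== grid abstractions =====
def landP (maps : List String) (p : Nat × Nat) : Prop :=
  p.1 < maps.length ∧ p.2 < gCols maps ∧ gCell maps p.1 p.2 ≠ 'X'

def edgeP (maps : List String) (p q : Nat × Nat) : Prop :=
  landP maps p ∧ landP maps q ∧
    ((q.1 = p.1 ∧ q.2 = p.2 + 1) ∨ (q.2 = p.2 ∧ q.1 = p.1 + 1))

def connP (maps : List String) : Nat × Nat → Nat × Nat → Prop :=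
  Relation.EqvGen (edgeP maps)

def idx (maps : List String) (p : Nat × Nat) : Nat := p.1 * gCols maps + p.2

def cellsList (maps : List String) : List (Nat × Nat) :=
  (List.range maps.length).flatMap (fun i => (List.range (gCols maps)).map (fun j => (i, j)))

def edgesOf (maps : List String) (p : Nat × Nat) : List (Nat × Nat) :=
  if gCell maps p.1 p.2 ≠ 'X' then
    (if p.2 + 1 < gCols maps ∧ gCell maps p.1 (p.2 + 1) ≠ 'X'
      then [(idx maps p, idx maps (p.1, p.2 + 1))] else []) ++
    (if p.1 + 1 < maps.length ∧ gCell maps (p.1 + 1) p.2 ≠ 'X'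
      then [(idx maps p, idx maps (p.1 + 1, p.2))] else [])
  else []

def edgeList (maps : List String) : List (Nat × Nat) :=
  (cellsList maps).flatMap (edgesOf maps)

lemma mem_cellsList {maps : List String} {p : Nat × Nat} :
    p ∈ cellsList maps ↔ p.1 < maps.length ∧ p.2 < gCols maps := by
  obtain ⟨i, j⟩ := p
  constructor
  · intro h
    simp only [cellsList, List.mem_flatMap, List.mem_range, List.mem_map] at h
    obtain ⟨i', hi', j', hj', heq⟩ := h
    obtain ⟨rfl, rfl⟩ := Prod.mk.injEq .. ▸ heq
    exact ⟨hi', hj'⟩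
  · rintro ⟨hi, hj⟩
    simp only [cellsList, List.mem_flatMap, List.mem_range, List.mem_map]
    exact ⟨i, hi, j, hj, rfl⟩

lemma idx_inj {maps : List String} {p q : Nat × Nat}
    (hp : p.2 < gCols maps) (hq : q.2 < gCols maps) (h : idx maps p = idx maps q) : p = q := by
  obtain ⟨i, j⟩ := p; obtain ⟨i', j'⟩ := q
  simp only [idx] at h
  simp only at hp hq
  have hii : i = i' := by
    rcases Nat.lt_trichotomy i i' with hlt | heq | hgt
    · nlinarith
    · exact heq
    · nlinarith
  subst hii
  have : j = j' := by omega
  rw [this]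

lemma mem_edgeList {maps : List String} {u v : Nat} :
    (u, v) ∈ edgeList maps ↔
      ∃ p q, edgeP maps p q ∧ u = idx maps p ∧ v = idx maps q := by
  constructor
  · intro h
    rw [edgeList, List.mem_flatMap] at h
    obtain ⟨p, hpmem, hpe⟩ := h
    rw [mem_cellsList] at hpmem
    rw [edgesOf] at hpe
    by_cases h1 : gCell maps p.1 p.2 ≠ 'X'
    · rw [if_pos h1, List.mem_append] at hpe
      rcases hpe with h2 | h2
      · by_cases h3 : p.2 + 1 < gCols maps ∧ gCell maps p.1 (p.2 + 1) ≠ 'X'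
        · rw [if_pos h3] at h2
          simp only [List.mem_singleton, Prod.mk.injEq] at h2
          refine ⟨p, (p.1, p.2 + 1), ⟨⟨hpmem.1, hpmem.2, h1⟩,
            ⟨hpmem.1, h3.1, ?_⟩, Or.inl ⟨rfl, rfl⟩⟩, h2.1, h2.2⟩
          have := h3.2
          push_cast at this
          exact this
        · rw [if_neg h3] at h2; simp at h2
      · by_cases h3 : p.1 + 1 < maps.length ∧ gCell maps (p.1 + 1) p.2 ≠ 'X'
        · rw [if_pos h3] at h2
          simp only [List.mem_singleton, Prod.mk.injEq] at h2
          refine ⟨p, (p.1 + 1, p.2), ⟨⟨hpmem.1, hpmem.2, h1⟩,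
            ⟨h3.1, hpmem.2, ?_⟩, Or.inr ⟨rfl, rfl⟩⟩, h2.1, h2.2⟩
          have := h3.2
          push_cast at this
          exact this
        · rw [if_neg h3] at h2; simp at h2
    · rw [if_neg h1] at hpe; simp at hpe
  · rintro ⟨p, q, ⟨hlp, hlq, hor⟩, rfl, rfl⟩
    rw [edgeList, List.mem_flatMap]
    refine ⟨p, mem_cellsList.mpr ⟨hlp.1, hlp.2.1⟩, ?_⟩
    rw [edgesOf, if_pos hlp.2.2, List.mem_append]
    obtain ⟨pi, pj⟩ := p
    rcases hor with ⟨h1, h2⟩ | ⟨h1, h2⟩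
    · left
      obtain ⟨qi, qj⟩ := q
      simp only at h1 h2
      subst h1; subst h2
      obtain ⟨-, hq2, hq3⟩ := hlq
      rw [if_pos ⟨by simpa using hq2, by push_cast; push_cast at hq3; exact hq3⟩]
      simp
    · right
      obtain ⟨qi, qj⟩ := q
      simp only at h1 h2
      subst h1; subst h2
      obtain ⟨hq1, -, hq3⟩ := hlq
      rw [if_pos ⟨by simpa using hq1, by push_cast; push_cast at hq3; exact hq3⟩]
      simp

lemma edgeList_lt {maps : List String} :
    ∀ e ∈ edgeList maps, e.1 < maps.length * gCols maps ∧ e.2 < maps.length * gCols maps := by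
  rintro ⟨u, v⟩ h
  obtain ⟨p, q, ⟨hlp, hlq, _⟩, rfl, rfl⟩ := mem_edgeList.mp h
  constructor
  · calc p.1 * gCols maps + p.2 < (p.1 + 1) * gCols maps := by
          simpa [Nat.add_mul] using hlp.2.1
      _ ≤ maps.length * gCols maps := Nat.mul_le_mul_right _ hlp.1
  · calc q.1 * gCols maps + q.2 < (q.1 + 1) * gCols maps := by
          simpa [Nat.add_mul] using hlq.2.1
      _ ≤ maps.length * gCols maps := Nat.mul_le_mul_right _ hlq.1

lemma land_of_conn {maps : List String} {p q : Nat × Nat} (h : connP maps p q) :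
    p = q ∨ (landP maps p ∧ landP maps q) := by
  induction h with
  | rel _ _ h => exact Or.inr ⟨h.1, h.2.1⟩
  | refl _ => exact Or.inl rfl
  | symm _ _ _ ih => tauto
  | trans _ _ _ _ _ ih1 ih2 => rcases ih1 with rfl | h1 <;> rcases ih2 with rfl | h2 <;> tauto

lemma connP_symm {maps : List String} {p q : Nat × Nat} (h : connP maps p q) : connP maps q p :=
  Relation.EqvGen.symm _ _ h

lemma connP_trans {maps : List String} {p q r : Nat × Nat}
    (h1 : connP maps p q) (h2 : connP maps q r) : connP maps p r :=
  Relation.EqvGen.trans _ _ _ h1 h2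

lemma erel_edgeList_iff {maps : List String} {p q : Nat × Nat}
    (hp : landP maps p) (hq : landP maps q) :
    erel (edgeList maps) (idx maps p) (idx maps q) ↔ connP maps p q := by
  constructor
  · intro h
    have key : ∀ u v, erel (edgeList maps) u v → u = v ∨
        ∃ p' q', landP maps p' ∧ landP maps q' ∧ u = idx maps p' ∧ v = idx maps q' ∧
          connP maps p' q' := by
      intro u v h
      induction h with
      | rel u v h =>
        obtain ⟨p', q', he, rfl, rfl⟩ := mem_edgeList.mp h
        exact Or.inr ⟨p', q', he.1, he.2.1, rfl, rfl, Relation.EqvGen.rel _ _ he⟩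
      | refl u => exact Or.inl rfl
      | symm u v _ ih =>
        rcases ih with rfl | ⟨p', q', h1, h2, h3, h4, h5⟩
        · exact Or.inl rfl
        · exact Or.inr ⟨q', p', h2, h1, h4, h3, connP_symm h5⟩
      | trans u v w _ _ ih1 ih2 =>
        rcases ih1 with rfl | ⟨p', q', h1, h2, h3, h4, h5⟩
        · exact ih2
        · rcases ih2 with rfl | ⟨p'', q'', g1, g2, g3, g4, g5⟩
          · exact Or.inr ⟨p', q', h1, h2, h3, h4, h5⟩
          · have heq : q' = p'' := idx_inj h2.2.1 g1.2.1 (h4 ▸ g3)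
            exact Or.inr ⟨p', q'', h1, g2, h3, g4, connP_trans h5 (heq ▸ g5)⟩
    rcases key _ _ h with heq | ⟨p', q', h1, h2, h3, h4, h5⟩
    · have : p = q := idx_inj hp.2.1 hq.2.1 heq
      exact this ▸ Relation.EqvGen.refl p
    · have hpp : p = p' := idx_inj hp.2.1 h1.2.1 h3
      have hqq : q = q' := idx_inj hq.2.1 h2.2.1 h4
      exact hpp ▸ hqq ▸ h5
  · intro h
    clear hp hq
    induction h with
    | rel a b h => exact Relation.EqvGen.rel _ _ (mem_edgeList.mpr ⟨a, b, h, rfl, rfl⟩)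
    | refl a => exact Relation.EqvGen.refl _
    | symm a b _ ih => exact Relation.EqvGen.symm _ _ ih
    | trans a b c _ _ ih1 ih2 => exact Relation.EqvGen.trans _ _ _ ih1 ih2

-- ===== visited matrix =====
def visOK (maps : List String) (v : List (List Bool)) : Prop :=
  v.length = maps.length ∧ ∀ row ∈ v, row.length = gCols maps

def visAt (v : List (List Bool)) (p : Nat × Nat) : Bool := getVis v p.1 p.2

def castP (p : Nat × Nat) : Int × Int := (p.1, p.2)

def cellValN (maps : List String) (p : Nat × Nat) : Int := cellVal (gCell maps p.1 p.2)

lemma getVis_natCast (v : List (List Bool)) (i j : Nat) :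
    getVis v (i : Int) (j : Int) = (v.getD i []).getD j false := by
  simp [getVis, pysem]

lemma setVis_natCast (v : List (List Bool)) (i j : Nat) :
    setVis v (i : Int) (j : Int) = v.set i ((v.getD i []).set j true) := by
  simp [setVis, pysem]

lemma visOK_setVis {maps : List String} {v : List (List Bool)} (hv : visOK maps v) (i j : Nat) :
    visOK maps (setVis v (i : Int) (j : Int)) := by
  rw [setVis_natCast]
  refine ⟨by simpa using hv.1, fun row hrow => ?_⟩
  rcases List.mem_or_eq_of_mem_set hrow with h | rfl
  · exact hv.2 _ h
  · by_cases hi : i < v.length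
    · rw [List.getD_eq_getElem?_getD, List.getElem?_eq_getElem hi]
      simpa using hv.2 _ (List.getElem_mem hi)
    · rw [List.set_eq_of_length_le (by omega)] at hrow
      exact hv.2 _ hrow

lemma visAt_setVis {maps : List String} {v : List (List Bool)} (hv : visOK maps v)
    {a : Nat × Nat} (ha1 : a.1 < maps.length) (ha2 : a.2 < gCols maps) (p : Nat × Nat) :
    visAt (setVis v (a.1 : Int) (a.2 : Int)) p = if p = a then true else visAt v p := by
  obtain ⟨hlen, hrows⟩ := hv
  have hia : a.1 < v.length := by omega
  have hrowlen : (v.getD a.1 []).length = gCols maps := by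
    rw [List.getD_eq_getElem?_getD, List.getElem?_eq_getElem hia]
    exact hrows _ (List.getElem_mem hia)
  rw [visAt, setVis_natCast, getVis_natCast]
  have houter : (v.set a.1 ((v.getD a.1 []).set a.2 true)).getD p.1 [] =
      if p.1 = a.1 then (v.getD a.1 []).set a.2 true else v.getD p.1 [] := by
    rcases eq_or_ne p.1 a.1 with heq | hne
    · rw [heq, if_pos rfl, List.getD_eq_getElem?_getD, List.getElem?_set_self hia]
      simp
    · rw [if_neg hne, List.getD_eq_getElem?_getD, List.getElem?_set_ne (by omega),
        ← List.getD_eq_getElem?_getD]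
  rw [houter]
  rcases eq_or_ne p.1 a.1 with heq | hne
  · rw [if_pos heq]
    rcases eq_or_ne p.2 a.2 with heq2 | hne2
    · rw [heq2, List.getD_eq_getElem?_getD, List.getElem?_set_self (by omega)]
      have : p = a := Prod.ext heq heq2
      simp [this]
    · rw [List.getD_eq_getElem?_getD, List.getElem?_set_ne (by omega),
        ← List.getD_eq_getElem?_getD, if_neg (fun hpa => hne2 (by rw [hpa]))]
      simp only [visAt, getVis_natCast, heq]
  · rw [if_neg hne, if_neg (fun hpa => hne (congrArg Prod.fst hpa))]
    simp only [visAt, getVis_natCast]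

-- ===== components =====
noncomputable def compFin (maps : List String) (s : Nat × Nat) : Finset (Nat × Nat) :=
  @Finset.filter _ (connP maps s) (Classical.decPred _)
    (Finset.range maps.length ×ˢ Finset.range (gCols maps))

lemma mem_compFin {maps : List String} {s p : Nat × Nat} :
    p ∈ compFin maps s ↔ p.1 < maps.length ∧ p.2 < gCols maps ∧ connP maps s p := by
  letI := Classical.decPred (connP maps s)
  rw [compFin, Finset.mem_filter, Finset.mem_product, Finset.mem_range, Finset.mem_range]
  tauto

noncomputable def compSum (maps : List String) (s : Nat × Nat) : Int :=
  ∑ p ∈ compFin maps s, cellValN maps p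

lemma class_subset_closed {maps : List String} {s : Nat × Nat} {M : Finset (Nat × Nat)}
    (hs : s ∈ M)
    (hclosed : ∀ p ∈ M, ∀ q, edgeP maps p q ∨ edgeP maps q p → q ∈ M) :
    ∀ q, connP maps s q → q ∈ M := by
  have key : ∀ a b, connP maps a b → (a ∈ M ↔ b ∈ M) := by
    intro a b h
    induction h with
    | rel a b h =>
      exact ⟨fun ha => hclosed a ha b (Or.inl h), fun hb => hclosed b hb a (Or.inr h)⟩
    | refl a => exact Iff.rfl
    | symm _ _ _ ih => exact ih.symm
    | trans _ _ _ _ _ ih1 ih2 => exact ih1.trans ih2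
  exact fun q hq => (key s q hq).mp hs

lemma edge_dirs {maps : List String} {a q : Nat × Nat} :
    (edgeP maps a q ∨ edgeP maps q a) ↔
      landP maps a ∧ landP maps q ∧
        ∃ d ∈ bfsDirs, (q.1 : Int) = (a.1 : Int) + d.1 ∧ (q.2 : Int) = (a.2 : Int) + d.2 := by
  constructor
  · rintro (⟨h1, h2, hor⟩ | ⟨h1, h2, hor⟩)
    · refine ⟨h1, h2, ?_⟩
      rcases hor with ⟨e1, e2⟩ | ⟨e1, e2⟩
      · exact ⟨(0, 1), by simp [bfsDirs], by push_cast; omega⟩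
      · exact ⟨(1, 0), by simp [bfsDirs], by push_cast; omega⟩
    · refine ⟨h2, h1, ?_⟩
      rcases hor with ⟨e1, e2⟩ | ⟨e1, e2⟩
      · exact ⟨(0, -1), by simp [bfsDirs], by push_cast; omega⟩
      · exact ⟨(-1, 0), by simp [bfsDirs], by push_cast; omega⟩
  · rintro ⟨hla, hlq, d, hd, h1, h2⟩
    fin_cases hd
    · exact Or.inr ⟨hlq, hla, Or.inl (by constructor <;> omega)⟩
    · exact Or.inl ⟨hla, hlq, Or.inl (by constructor <;> omega)⟩
    · exact Or.inr ⟨hlq, hla, Or.inr (by constructor <;> omega)⟩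
    · exact Or.inl ⟨hla, hlq, Or.inr (by constructor <;> omega)⟩

-- the body of the neighbour scan in bfsLoop
def bfsBody (maps : List String) (nx ny : Int) :
    List (Int × Int) × List (List Bool) → Int × Int → List (Int × Int) × List (List Bool) :=
  fun st d =>
    let x := nx + d.1
    let y := ny + d.2
    if 0 ≤ x ∧ x < (maps.length : Int) ∧ 0 ≤ y ∧ y < (gCols maps : Int) then
      if gCell maps x y = 'X' ∨ getVis st.2 x y = true then st
      else (st.1 ++ [(x, y)], setVis st.2 x y)
    else st

lemma bfsLoop_nil (maps : List String) (fuel : Nat) (v : List (List Bool)) (c : Int) :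
    bfsLoop maps fuel [] v c = (c, v) := by cases fuel <;> rfl

lemma bfsLoop_cons (maps : List String) (fuel : Nat) (nx ny : Int)
    (rest : List (Int × Int)) (visited : List (List Bool)) (count : Int) :
    bfsLoop maps (fuel + 1) ((nx, ny) :: rest) visited count =
      bfsLoop maps fuel (bfsDirs.foldl (bfsBody maps nx ny) (rest, visited)).1
        (bfsDirs.foldl (bfsBody maps nx ny) (rest, visited)).2
        (count + cellVal (gCell maps nx ny)) := rfl

lemma bfs_step (maps : List String) (s : Nat × Nat) (V : Nat × Nat → Prop)
    (hVdisj : ∀ p, V p → ¬ connP maps s p)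
    {a : Nat × Nat} (hconnA : connP maps s a) (hlandA : landP maps a)
    {d : Int × Int} (hd : d ∈ bfsDirs)
    (CdA M' : Finset (Nat × Nat)) (ql2 : List (Nat × Nat)) (v : List (List Bool))
    (_haCdA : a ∈ CdA) (hCdA : ∀ p ∈ CdA, p ∈ M')
    (h1 : ql2.Nodup) (h2 : ∀ p, p ∈ ql2 ↔ p ∈ M' ∧ p ∉ CdA)
    (h3 : ∀ p ∈ M', connP maps s p ∧ landP maps p)
    (h4 : visOK maps v)
    (h5 : ∀ p : Nat × Nat, p.1 < maps.length → p.2 < gCols maps →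
      (visAt v p = true ↔ V p ∨ p ∈ M')) :
    ∃ (M'' : Finset (Nat × Nat)) (ql2' : List (Nat × Nat)),
      bfsBody maps a.1 a.2 (ql2.map castP, v) d = (ql2'.map castP,
        (bfsBody maps a.1 a.2 (ql2.map castP, v) d).2) ∧
      M' ⊆ M'' ∧
      (∀ qq : Nat × Nat, landP maps qq → (qq.1 : Int) = (a.1 : Int) + d.1 →
        (qq.2 : Int) = (a.2 : Int) + d.2 → qq ∈ M'') ∧
      ql2'.Nodup ∧ (∀ p, p ∈ ql2' ↔ p ∈ M'' ∧ p ∉ CdA) ∧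
      (∀ p ∈ M'', connP maps s p ∧ landP maps p) ∧
      visOK maps (bfsBody maps a.1 a.2 (ql2.map castP, v) d).2 ∧
      (∀ p : Nat × Nat, p.1 < maps.length → p.2 < gCols maps →
        (visAt (bfsBody maps a.1 a.2 (ql2.map castP, v) d).2 p = true ↔ V p ∨ p ∈ M'')) ∧
      ql2'.length + ((compFin maps s) \ M'').card = ql2.length + ((compFin maps s) \ M').card := by
  rw [bfsBody]
  by_cases hbound : 0 ≤ (a.1 : Int) + d.1 ∧ (a.1 : Int) + d.1 < (maps.length : Int) ∧
      0 ≤ (a.2 : Int) + d.2 ∧ (a.2 : Int) + d.2 < (gCols maps : Int)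
  · rw [if_pos hbound]
    set x := (a.1 : Int) + d.1 with hxdef
    set y := (a.2 : Int) + d.2 with hydef
    obtain ⟨hx0, hxR, hy0, hyC⟩ := hbound
    set q : Nat × Nat := (x.toNat, y.toNat) with hqdef
    have hqx : (q.1 : Int) = x := Int.toNat_of_nonneg hx0
    have hqy : (q.2 : Int) = y := Int.toNat_of_nonneg hy0
    have hq1 : q.1 < maps.length := by omega
    have hq2 : q.2 < gCols maps := by omega
    have hcell : gCell maps x y = gCell maps q.1 q.2 := by rw [hqx, hqy]
    have hvis : getVis v x y = visAt v q := by rw [← hqx, ← hqy]; rfl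
    have hcast : castP q = (x, y) := by rw [castP, hqx, hqy]
    by_cases hskip : gCell maps x y = 'X' ∨ getVis v x y = true
    · rw [if_pos hskip]
      refine ⟨M', ql2, rfl, Finset.Subset.refl _, ?_, h1, h2, h3, h4, h5, rfl⟩
      intro qq hlqq hqq1 hqq2
      have hqqq : qq = q := by
        obtain ⟨q1, q2⟩ := q; obtain ⟨qq1, qq2⟩ := qq
        simp only at hqx hqy hqq1 hqq2
        have : (qq1 : Int) = q1 := by omega
        have : qq1 = q1 := by omega
        subst this
        have : qq2 = q2 := by omega
        rw [this]
      subst hqqq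
      rcases hskip with hX | hvisq
      · exact absurd (hcell ▸ hX) (by
          have := hlqq.2.2
          push_cast at this ⊢
          exact fun hc => this hc)
      · have := (h5 q hq1 hq2).mp (hvis ▸ hvisq)
        rcases this with hV | hM
        · exact absurd (connP_trans hconnA (by
            have hedge : edgeP maps a q ∨ edgeP maps q a := by
              rw [edge_dirs]
              exact ⟨hlandA, hlqq, d, hd, by omega, by omega⟩
            rcases hedge with h | h
            · exact Relation.EqvGen.rel _ _ h
            · exact Relation.EqvGen.symm _ _ (Relation.EqvGen.rel _ _ h))) (hVdisj q hV)
        · exact hM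
    · rw [if_neg hskip]
      push Not at hskip
      obtain ⟨hnX, hnvis⟩ := hskip
      have hlandq : landP maps q := ⟨hq1, hq2, by
        have := hcell ▸ hnX
        exact this⟩
      have hedge : edgeP maps a q ∨ edgeP maps q a := by
        rw [edge_dirs]
        exact ⟨hlandA, hlandq, d, hd, by omega, by omega⟩
      have hconnq : connP maps s q := by
        refine connP_trans hconnA ?_
        rcases hedge with h | h
        · exact Relation.EqvGen.rel _ _ h
        · exact Relation.EqvGen.symm _ _ (Relation.EqvGen.rel _ _ h)
      have hqnotM : q ∉ M' := by
        intro hqM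
        have := (h5 q hq1 hq2).mpr (Or.inr hqM)
        rw [hvis] at hnvis
        simp [this] at hnvis
      have hqnotql : q ∉ ql2 := fun h => hqnotM ((h2 q).mp h).1
      refine ⟨insert q M', ql2 ++ [q], ?_, Finset.subset_insert _ _, ?_, ?_, ?_, ?_, ?_, ?_, ?_⟩
      · simp [hcast]
      · intro qq hlqq hqq1 hqq2
        have hqqq : qq = q := by
          obtain ⟨q1, q2⟩ := q; obtain ⟨qq1, qq2⟩ := qq
          simp only at hqx hqy hqq1 hqq2
          have : qq1 = q1 := by omega
          subst this
          have : qq2 = q2 := by omega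
          rw [this]
        subst hqqq
        exact Finset.mem_insert_self _ _
      · refine List.nodup_append.mpr ⟨h1, List.nodup_singleton _, ?_⟩
        intro p hp x hx
        have hxq : x = q := by simpa using hx
        exact fun hpx => hqnotql (by rw [← hxq, ← hpx]; exact hp)
      · intro p
        simp only [List.mem_append, List.mem_singleton, h2, Finset.mem_insert]
        constructor
        · rintro (⟨hpM, hpCd⟩ | rfl)
          · exact ⟨Or.inr hpM, hpCd⟩
          · exact ⟨Or.inl rfl, fun hc => hqnotM (hCdA _ hc)⟩
        · rintro ⟨hpM | hpM, hpCd⟩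
          · exact Or.inr hpM
          · exact Or.inl ⟨hpM, hpCd⟩
      · intro p hp
        rcases Finset.mem_insert.mp hp with rfl | hp
        · exact ⟨hconnq, hlandq⟩
        · exact h3 p hp
      · show visOK maps (setVis v x y)
        rw [← hqx, ← hqy]
        exact visOK_setVis h4 q.1 q.2
      · intro p hp1 hp2
        show visAt (setVis v x y) p = true ↔ _
        rw [← hqx, ← hqy, visAt_setVis h4 hq1 hq2 p]
        rcases eq_or_ne p q with rfl | hne
        · simp
        · rw [if_neg hne, h5 p hp1 hp2, Finset.mem_insert]
          constructor
          · rintro (h | h)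
            · exact Or.inl h
            · exact Or.inr (Or.inr h)
          · rintro (h | rfl | h)
            · exact Or.inl h
            · exact absurd rfl hne
            · exact Or.inr h
      · have hqcomp : q ∈ compFin maps s := mem_compFin.mpr ⟨hq1, hq2, hconnq⟩
        have : (compFin maps s \ insert q M') = (compFin maps s \ M').erase q := by
          ext r
          simp only [Finset.mem_sdiff, Finset.mem_insert, Finset.mem_erase]
          tauto
        rw [this, Finset.card_erase_of_mem (Finset.mem_sdiff.mpr ⟨hqcomp, hqnotM⟩)]
        have hpos : 0 < (compFin maps s \ M').card :=
          Finset.card_pos.mpr ⟨q, Finset.mem_sdiff.mpr ⟨hqcomp, hqnotM⟩⟩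
        simp only [List.length_append, List.length_singleton]
        omega
  · rw [if_neg hbound]
    refine ⟨M', ql2, rfl, Finset.Subset.refl _, ?_, h1, h2, h3, h4, h5, rfl⟩
    intro qq hlqq hqq1 hqq2
    exfalso
    apply hbound
    obtain ⟨hL1, hL2, -⟩ := hlqq
    refine ⟨by omega, by omega, by omega, by omega⟩

lemma bfsLoop_spec (maps : List String) (s : Nat × Nat) (V : Nat × Nat → Prop)
    (hVdisj : ∀ p, V p → ¬ connP maps s p) :
    ∀ (fuel : Nat) (ql : List (Nat × Nat)) (visited : List (List Bool)) (count c0 : Int)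
      (M Cd : Finset (Nat × Nat)),
      ql.length + ((compFin maps s) \ M).card ≤ fuel →
      ql.Nodup → (∀ p, p ∈ ql ↔ p ∈ M ∧ p ∉ Cd) →
      (∀ p ∈ Cd, p ∈ M) →
      (∀ p ∈ M, connP maps s p ∧ landP maps p) → s ∈ M →
      (∀ p ∈ Cd, ∀ q, edgeP maps p q ∨ edgeP maps q p → q ∈ M) →
      visOK maps visited →
      (∀ p : Nat × Nat, p.1 < maps.length → p.2 < gCols maps →
        (visAt visited p = true ↔ V p ∨ p ∈ M)) →
      count = c0 + ∑ p ∈ Cd, cellValN maps p →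
      (bfsLoop maps fuel (ql.map castP) visited count).1 = c0 + compSum maps s ∧
      visOK maps (bfsLoop maps fuel (ql.map castP) visited count).2 ∧
      ∀ p : Nat × Nat, p.1 < maps.length → p.2 < gCols maps →
        (visAt (bfsLoop maps fuel (ql.map castP) visited count).2 p = true ↔
          V p ∨ connP maps s p) := by
  intro fuel
  induction fuel with
  | zero =>
    intro ql visited count c0 M Cd hfuel hnd hql hCdM h3 hsM hclosed hvOK hvchar hcount
    match ql with
    | [] =>
      have hMCd : M = Cd := by
        apply Finset.Subset.antisymm
        · intro p hp
          by_contra hpc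
          exact absurd ((hql p).mpr ⟨hp, hpc⟩) (List.not_mem_nil)
        · intro p hp; exact hCdM p hp
      have hclosedM : ∀ p ∈ M, ∀ q, edgeP maps p q ∨ edgeP maps q p → q ∈ M := by
        intro p hp q hq
        exact hclosed p (hMCd ▸ hp) q hq
      have hMcomp : M = compFin maps s := by
        apply Finset.Subset.antisymm
        · intro p hp
          obtain ⟨hc, hl⟩ := h3 p hp
          exact mem_compFin.mpr ⟨hl.1, hl.2.1, hc⟩
        · intro p hp
          exact class_subset_closed hsM hclosedM p (mem_compFin.mp hp).2.2
      rw [List.map_nil, bfsLoop_nil]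
      have hsum : count = c0 + compSum maps s := by
        rw [hcount, compSum, ← hMcomp, hMCd]
      refine ⟨hsum, hvOK, fun p hp1 hp2 => ?_⟩
      · show visAt visited p = true ↔ _
        rw [hvchar p hp1 hp2]
        constructor
        · rintro (h | h)
          · exact Or.inl h
          · exact Or.inr (h3 p h).1
        · rintro (h | h)
          · exact Or.inl h
          · exact Or.inr (by rw [hMcomp]; exact mem_compFin.mpr ⟨hp1, hp2, h⟩)
    | a :: ql' => simp at hfuel
  | succ fuel ih =>
    intro ql visited count c0 M Cd hfuel hnd hql hCdM h3 hsM hclosed hvOK hvchar hcount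
    match ql, hnd with
    | [], _ =>
      exact (by
        have h0 : ([] : List (Nat × Nat)).length + ((compFin maps s) \ M).card ≤ 0 ∨ True :=
          Or.inr trivial
        -- reuse the zero-fuel nil reasoning
        have hMCd : M = Cd := by
          apply Finset.Subset.antisymm
          · intro p hp
            by_contra hpc
            exact absurd ((hql p).mpr ⟨hp, hpc⟩) (List.not_mem_nil)
          · intro p hp; exact hCdM p hp
        have hclosedM : ∀ p ∈ M, ∀ q, edgeP maps p q ∨ edgeP maps q p → q ∈ M := by
          intro p hp q hq
          exact hclosed p (hMCd ▸ hp) q hq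
        have hMcomp : M = compFin maps s := by
          apply Finset.Subset.antisymm
          · intro p hp
            obtain ⟨hc, hl⟩ := h3 p hp
            exact mem_compFin.mpr ⟨hl.1, hl.2.1, hc⟩
          · intro p hp
            exact class_subset_closed hsM hclosedM p (mem_compFin.mp hp).2.2
        rw [List.map_nil, bfsLoop_nil]
        have hsum : count = c0 + compSum maps s := by
          rw [hcount, compSum, ← hMcomp, hMCd]
        refine ⟨hsum, hvOK, fun p hp1 hp2 => ?_⟩
        show visAt visited p = true ↔ _
        rw [hvchar p hp1 hp2]
        constructor
        · rintro (h | h)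
          · exact Or.inl h
          · exact Or.inr (h3 p h).1
        · rintro (h | h)
          · exact Or.inl h
          · exact Or.inr (by rw [hMcomp]; exact mem_compFin.mpr ⟨hp1, hp2, h⟩))
    | a :: ql', hnd =>
      have haM : a ∈ M ∧ a ∉ Cd := (hql a).mp List.mem_cons_self
      obtain ⟨hconnA, hlandA⟩ := h3 a haM.1
      have hanotql' : a ∉ ql' := (List.nodup_cons.mp hnd).1
      have hnd' : ql'.Nodup := (List.nodup_cons.mp hnd).2
      set CdA := insert a Cd with hCdAdef
      have haCdA : a ∈ CdA := Finset.mem_insert_self _ _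
      have hCdACd : ∀ p ∈ CdA, p ∈ M := by
        intro p hp
        rcases Finset.mem_insert.mp hp with rfl | hp
        · exact haM.1
        · exact hCdM p hp
      have hql' : ∀ p, p ∈ ql' ↔ p ∈ M ∧ p ∉ CdA := by
        intro p
        constructor
        · intro hp
          have := (hql p).mp (List.mem_cons_of_mem a hp)
          refine ⟨this.1, ?_⟩
          rw [hCdAdef, Finset.mem_insert]
          rintro (rfl | hc)
          · exact hanotql' hp
          · exact this.2 hc
        · rintro ⟨hpM, hpCdA⟩
          have hpa : p ≠ a := fun h => hpCdA (h ▸ haCdA)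
          have := (hql p).mpr ⟨hpM, fun hc => hpCdA (Finset.mem_insert_of_mem hc)⟩
          rcases List.mem_cons.mp this with h | h
          · exact absurd h hpa
          · exact h
      -- unfold one loop iteration
      have hcons : (a :: ql').map castP = ((a.1 : Int), (a.2 : Int)) :: ql'.map castP := rfl
      rw [hcons, bfsLoop_cons]
      -- the four direction steps
      rw [show bfsDirs.foldl (bfsBody maps a.1 a.2) (ql'.map castP, visited) =
        bfsBody maps a.1 a.2 (bfsBody maps a.1 a.2 (bfsBody maps a.1 a.2
          (bfsBody maps a.1 a.2 (ql'.map castP, visited) (0, -1)) (0, 1)) (-1, 0)) (1, 0) from rfl]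
      obtain ⟨M1, ql1, hst1, hsub1, hcov1, hnd1, hmem1, h31, hvOK1, hvchar1, hmeas1⟩ :=
        bfs_step maps s V hVdisj hconnA hlandA (by simp [bfsDirs] : ((0 : Int), (-1 : Int)) ∈ bfsDirs)
          CdA M ql' visited haCdA hCdACd hnd' hql' h3 hvOK hvchar
      rw [hst1]
      obtain ⟨M2, ql2, hst2, hsub2, hcov2, hnd2, hmem2, h32, hvOK2, hvchar2, hmeas2⟩ :=
        bfs_step maps s V hVdisj hconnA hlandA (by simp [bfsDirs] : ((0 : Int), (1 : Int)) ∈ bfsDirs)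
          CdA M1 ql1 (bfsBody maps a.1 a.2 (ql'.map castP, visited) (0, -1)).2
          haCdA (fun p hp => hsub1 (hCdACd p hp)) hnd1 hmem1 h31 hvOK1 hvchar1
      rw [hst2]
      obtain ⟨M3, ql3, hst3, hsub3, hcov3, hnd3, hmem3, h33, hvOK3, hvchar3, hmeas3⟩ :=
        bfs_step maps s V hVdisj hconnA hlandA (by simp [bfsDirs] : ((-1 : Int), (0 : Int)) ∈ bfsDirs)
          CdA M2 ql2 _ haCdA (fun p hp => hsub2 (hsub1 (hCdACd p hp))) hnd2 hmem2 h32 hvOK2 hvchar2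
      rw [hst3]
      obtain ⟨M4, ql4, hst4, hsub4, hcov4, hnd4, hmem4, h34, hvOK4, hvchar4, hmeas4⟩ :=
        bfs_step maps s V hVdisj hconnA hlandA (by simp [bfsDirs] : ((1 : Int), (0 : Int)) ∈ bfsDirs)
          CdA M3 ql3 _ haCdA (fun p hp => hsub3 (hsub2 (hsub1 (hCdACd p hp)))) hnd3 hmem3 h33 hvOK3 hvchar3
      rw [hst4]
      -- recurse
      have hsub14 : M1 ⊆ M4 := fun p hp => hsub4 (hsub3 (hsub2 hp))
      have hsub24 : M2 ⊆ M4 := fun p hp => hsub4 (hsub3 hp)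
      have hsubM4 : M ⊆ M4 := fun p hp => hsub14 (hsub1 hp)
      have hclosed4 : ∀ p ∈ CdA, ∀ q, edgeP maps p q ∨ edgeP maps q p → q ∈ M4 := by
        intro p hp q hedge
        rcases Finset.mem_insert.mp hp with rfl | hp
        · -- p = a: q is a neighbour of a
          obtain ⟨-, hlq, d, hd, he1, he2⟩ := edge_dirs.mp hedge
          fin_cases hd
          · exact hsub14 (hcov1 q hlq he1 he2)
          · exact hsub24 (hcov2 q hlq he1 he2)
          · exact hsub4 (hcov3 q hlq he1 he2)
          · exact hcov4 q hlq he1 he2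
        · exact hsubM4 (hclosed p hp q hedge)
      have hcount4 : count + cellVal (gCell maps a.1 a.2) =
          c0 + ∑ p ∈ CdA, cellValN maps p := by
        rw [hCdAdef, Finset.sum_insert haM.2, hcount]
        show _ + cellValN maps a = _
        ring
      have hfuel4 : ql4.length + ((compFin maps s) \ M4).card ≤ fuel := by
        have : (a :: ql').length = ql'.length + 1 := by simp
        omega
      exact ih ql4 _ _ c0 M4 CdA hfuel4 hnd4 hmem4
        (fun p hp => hsub4 (hsub3 (hsub2 (hsub1 (hCdACd p hp))))) h34 (hsubM4 hsM)
        hclosed4 hvOK4 hvchar4 hcount4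

lemma nested_foldl_eq {α : Type} (R C : Nat) (g : α → Nat → Nat → α) (init : α) :
    (List.range R).foldl (fun acc i => (List.range C).foldl (fun acc j => g acc i j) acc) init =
      ((List.range R).flatMap (fun i => (List.range C).map (fun j => (i, j)))).foldl
        (fun acc p => g acc p.1 p.2) init := by
  rw [List.foldl_flatMap]
  congr 1
  funext acc i
  rw [List.foldl_map]

-- B's parent fold is applyUnions over the edge list
lemma parentB_eq (maps : List String) :
    (List.range maps.length).foldl (fun par (i : Nat) =>
      (List.range (gCols maps)).foldl (fun (par : List Nat) (j : Nat) =>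
        if gCell maps i j ≠ 'X' then
          let par' := if j + 1 < gCols maps ∧ gCell maps i (j + 1) ≠ 'X'
            then ufUnion par (i * gCols maps + j) (i * gCols maps + j + 1) else par
          if i + 1 < maps.length ∧ gCell maps (i + 1) j ≠ 'X'
            then ufUnion par' (i * gCols maps + j) ((i + 1) * gCols maps + j) else par'
        else par) par) (List.range (maps.length * gCols maps)) =
      applyUnions (maps.length * gCols maps) (edgeList maps) := by
  rw [nested_foldl_eq maps.length (gCols maps) (fun par i j =>
    if gCell maps i j ≠ 'X' then
      let par' := if j + 1 < gCols maps ∧ gCell maps i (j + 1) ≠ 'X'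
        then ufUnion par (i * gCols maps + j) (i * gCols maps + j + 1) else par
      if i + 1 < maps.length ∧ gCell maps (i + 1) j ≠ 'X'
        then ufUnion par' (i * gCols maps + j) ((i + 1) * gCols maps + j) else par'
    else par)]
  rw [applyUnions, edgeList]
  conv_rhs => rw [List.foldl_flatMap]
  show (cellsList maps).foldl _ _ = (cellsList maps).foldl _ _
  apply PySem.List.foldl_congr_mem
  intro par p hp
  rw [edgesOf]
  obtain ⟨i, j⟩ := p
  by_cases h1 : gCell maps i j ≠ 'X'
  · rw [if_pos h1]
    simp only [if_pos h1, idx]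
    by_cases h2 : j + 1 < gCols maps ∧ gCell maps i (j + 1) ≠ 'X' <;>
      by_cases h3 : i + 1 < maps.length ∧ gCell maps (i + 1) j ≠ 'X'
    · rw [if_pos h2, if_pos h3, if_pos h2, if_pos h3]; rfl
    · rw [if_pos h2, if_neg h3, if_pos h2, if_neg h3]; rfl
    · rw [if_neg h2, if_pos h3, if_neg h2, if_pos h3]; rfl
    · rw [if_neg h2, if_neg h3, if_neg h2, if_neg h3]; rfl
  · rw [if_neg h1]
    simp only [if_neg h1, List.foldl_nil]

lemma bfsA_spec (maps : List String) (s : Nat × Nat) (V : Nat × Nat → Prop)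
    (hVdisj : ∀ p, V p → ¬ connP maps s p) (hsland : landP maps s)
    (visited : List (List Bool)) (hvOK : visOK maps visited)
    (hvchar : ∀ p : Nat × Nat, p.1 < maps.length → p.2 < gCols maps →
      (visAt visited p = true ↔ V p)) :
    (bfsA maps visited s.1 s.2).1 = compSum maps s ∧
    visOK maps (bfsA maps visited s.1 s.2).2 ∧
    ∀ p : Nat × Nat, p.1 < maps.length → p.2 < gCols maps →
      (visAt (bfsA maps visited s.1 s.2).2 p = true ↔ V p ∨ connP maps s p) := by
  letI := Classical.decPred (connP maps s)
  have hcard : (compFin maps s).card ≤ maps.length * gCols maps := by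
    calc (compFin maps s).card ≤
        ((Finset.range maps.length) ×ˢ (Finset.range (gCols maps))).card := by
          apply Finset.card_le_card
          intro p hp
          rw [compFin] at hp
          exact Finset.mem_of_mem_filter p hp
      _ = maps.length * gCols maps := by rw [Finset.card_product, Finset.card_range, Finset.card_range]
  have h := bfsLoop_spec maps s V hVdisj (maps.length * gCols maps + 1) [s]
    (setVis visited s.1 s.2) 0 0 {s} ∅
    (by
      have : ((compFin maps s) \ {s}).card ≤ (compFin maps s).card := Finset.card_le_card (Finset.sdiff_subset)
      simp only [List.length_singleton]
      omega)
    (List.nodup_singleton s)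
    (by intro p; simp)
    (by simp)
    (by
      intro p hp
      rw [Finset.mem_singleton] at hp
      subst hp
      exact ⟨Relation.EqvGen.refl _, hsland⟩)
    (Finset.mem_singleton_self s)
    (by simp)
    (visOK_setVis hvOK s.1 s.2)
    (by
      intro p hp1 hp2
      rw [show visAt (setVis visited (s.1 : Int) (s.2 : Int)) p = _ from
        visAt_setVis hvOK hsland.1 hsland.2.1 p]
      rcases eq_or_ne p s with rfl | hne
      · simp
      · rw [if_neg hne, hvchar p hp1 hp2, Finset.mem_singleton]
        exact ⟨fun h => Or.inl h, fun h => h.resolve_right hne⟩)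
    (by simp)
  simpa [bfsA] using h

-- the final parent array of B and its characterisation
lemma roots_iff (maps : List String) {p q : Nat × Nat}
    (hp : landP maps p) (hq : landP maps q) :
    ufFind (applyUnions (maps.length * gCols maps) (edgeList maps)) (idx maps p) =
      ufFind (applyUnions (maps.length * gCols maps) (edgeList maps)) (idx maps q) ↔
      connP maps p q := by
  rw [(applyUnions_spec (edgeList maps) edgeList_lt).2 (idx maps p) (idx maps q)]
  exact erel_edgeList_iff hp hq

noncomputable def psum (maps : List String) (proc : List (Nat × Nat)) (s : Nat × Nat) : Int :=
  (proc.map (fun t =>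
    haveI := Classical.propDecidable (landP maps t ∧ connP maps s t)
    if landP maps t ∧ connP maps s t then cellValN maps t else 0)).sum

lemma psum_append (maps : List String) (proc : List (Nat × Nat)) (p s : Nat × Nat) :
    psum maps (proc ++ [p]) s = psum maps proc s +
      (haveI := Classical.propDecidable (landP maps p ∧ connP maps s p)
       if landP maps p ∧ connP maps s p then cellValN maps p else 0) := by
  rw [psum, psum, List.map_append, List.sum_append, List.map_singleton, List.sum_singleton]

def stepA (maps : List String) : List Int × List (List Bool) → Nat × Nat → List Int × List (List Bool) :=
  fun st p =>
    if gCell maps p.1 p.2 ≠ 'X' ∧ getVis st.2 p.1 p.2 = false then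
      (st.1 ++ [(bfsA maps st.2 p.1 p.2).1], (bfsA maps st.2 p.1 p.2).2)
    else st

def stepB (maps : List String) (parent : List Nat) :
    PySem.Dict Nat Int → Nat × Nat → PySem.Dict Nat Int :=
  fun d p =>
    if gCell maps p.1 p.2 ≠ 'X' then
      d.insert (ufFind parent (idx maps p))
        (d.getD (ufFind parent (idx maps p)) 0 + cellVal (gCell maps p.1 p.2))
    else d

def InvJ (maps : List String) (parent : List Nat) (proc : List (Nat × Nat))
    (stA : List Int × List (List Bool)) (d : PySem.Dict Nat Int) : Prop :=
  ∃ seeds : List (Nat × Nat),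
    (∀ s ∈ seeds, landP maps s) ∧
    List.Pairwise (fun s t => ¬ connP maps s t) seeds ∧
    (∀ t ∈ proc, landP maps t → ∃ s ∈ seeds, connP maps s t) ∧
    stA.1 = seeds.map (compSum maps) ∧
    visOK maps stA.2 ∧
    (∀ p : Nat × Nat, p.1 < maps.length → p.2 < gCols maps →
      (visAt stA.2 p = true ↔ ∃ s ∈ seeds, connP maps s p)) ∧
    d.items = seeds.map (fun s => (ufFind parent (idx maps s), psum maps proc s))

lemma masterStep (maps : List String) (parent : List Nat)
    (hroots : ∀ p q : Nat × Nat, landP maps p → landP maps q →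
      (ufFind parent (idx maps p) = ufFind parent (idx maps q) ↔ connP maps p q))
    (proc : List (Nat × Nat)) (stA : List Int × List (List Bool)) (d : PySem.Dict Nat Int)
    {p : Nat × Nat} (hp1 : p.1 < maps.length) (hp2 : p.2 < gCols maps)
    (hInv : InvJ maps parent proc stA d) :
    InvJ maps parent (proc ++ [p]) (stepA maps stA p) (stepB maps parent d p) := by
  obtain ⟨seeds, s1, s2, s3, a1, a2, a3, b1⟩ := hInv
  have hpairf : ∀ x ∈ seeds, ∀ y ∈ seeds, x ≠ y → ¬ connP maps x y := by
    intro x hx y hy hne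
    exact List.Pairwise.forall (fun a b h hc => h (connP_symm hc)) s2 hx hy hne
  by_cases hland : gCell maps p.1 p.2 ≠ 'X'
  · have hlandp : landP maps p := ⟨hp1, hp2, hland⟩
    by_cases hcov : ∃ s ∈ seeds, connP maps s p
    · -- p already inside an existing component: A skips, B updates that component's bucket
      obtain ⟨s0, hs0, hconn0⟩ := hcov
      have hvistrue : visAt stA.2 p = true := (a3 p hp1 hp2).mpr ⟨s0, hs0, hconn0⟩
      have hstA : stepA maps stA p = stA := by
        rw [stepA, if_neg]
        rintro ⟨-, hfalse⟩
        rw [show getVis stA.2 (p.1 : Int) (p.2 : Int) = visAt stA.2 p from rfl, hvistrue] at hfalse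
        exact absurd hfalse (by simp)
      rw [hstA]
      set r := ufFind parent (idx maps p) with hrdef
      have hkey0 : ufFind parent (idx maps s0) = r :=
        (hroots s0 p (s1 s0 hs0) hlandp).mpr hconn0
      have hkeysnodup : d.keys.Nodup := by
        show (d.items.map (·.1)).Nodup
        rw [b1, List.map_map]
        apply List.Nodup.map_on
        · intro x hx y hy hxy
          by_contra hne
          exact hpairf x hx y hy hne
            ((hroots x y (s1 x hx) (s1 y hy)).mp (by simpa using hxy))
        · apply List.Pairwise.imp_of_mem (l := seeds) ?_ s2
          intro a b ha hb hc heq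
          exact hc (heq ▸ Relation.EqvGen.refl a)
      have hmem0 : (r, psum maps proc s0) ∈ d.items := by
        rw [b1]
        exact List.mem_map.mpr ⟨s0, hs0, by rw [hkey0]⟩
      have hgetD : d.getD r 0 = psum maps proc s0 :=
        PySem.Dict.getD_of_mem_items d hmem0 hkeysnodup 0
      have hcontains : d.contains r = true := by
        rw [PySem.Dict.contains_iff_mem_keys]
        show r ∈ d.items.map (·.1)
        exact List.mem_map.mpr ⟨(r, psum maps proc s0), hmem0, rfl⟩
      refine ⟨seeds, s1, s2, ?_, a1, a2, a3, ?_⟩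
      · intro t ht hlt
        rcases List.mem_append.mp ht with ht | ht
        · exact s3 t ht hlt
        · have : t = p := by simpa using ht
          exact ⟨s0, hs0, this ▸ hconn0⟩
      · rw [stepB, if_pos hland, ← hrdef, PySem.Dict.items_insert_of_contains d _ hcontains,
          b1, List.map_map, hgetD]
        apply List.map_congr_left
        intro s hs
        simp only [Function.comp_apply]
        by_cases hseq : s = s0
        · subst hseq
          rw [if_pos (by simp [hkey0])]
          refine Prod.ext hkey0.symm ?_
          rw [psum_append, if_pos ⟨hlandp, hconn0⟩]
          rfl
        · have hnc : ¬ connP maps s p := by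
            intro hc
            exact hpairf s hs s0 hs0 hseq (connP_trans hc (connP_symm hconn0))
          rw [if_neg (by
            simp only [beq_iff_eq]
            intro he
            exact hnc ((hroots s p (s1 s hs) hlandp).mp he))]
          rw [psum_append, if_neg (fun hc => hnc hc.2), add_zero]
    · -- fresh seed: A launches a BFS, B opens a fresh bucket
      have hvisfalse : visAt stA.2 p = false := by
        rcases Bool.eq_false_or_eq_true (visAt stA.2 p) with h | h
        · exact absurd ((a3 p hp1 hp2).mp h) hcov
        · exact h
      have hVdisj : ∀ q, (∃ s ∈ seeds, connP maps s q) → ¬ connP maps p q := by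
        rintro q ⟨s', hs', hc'⟩ hpq
        exact hcov ⟨s', hs', connP_trans hc' (connP_symm hpq)⟩
      obtain ⟨hb1, hb2, hb3⟩ := bfsA_spec maps p (fun q => ∃ s ∈ seeds, connP maps s q)
        hVdisj hlandp stA.2 a2 (fun q hq1 hq2 => a3 q hq1 hq2)
      have hstA : stepA maps stA p =
          (stA.1 ++ [(bfsA maps stA.2 p.1 p.2).1], (bfsA maps stA.2 p.1 p.2).2) := by
        rw [stepA, if_pos ⟨hland, by
          rw [show getVis stA.2 (p.1 : Int) (p.2 : Int) = visAt stA.2 p from rfl, hvisfalse]⟩]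
      rw [hstA]
      set r := ufFind parent (idx maps p) with hrdef
      have hrfresh : d.contains r = false := by
        rcases Bool.eq_false_or_eq_true (d.contains r) with h | h
        swap
        · exact h
        · exfalso
          rw [PySem.Dict.contains_iff_mem_keys] at h
          have : r ∈ d.items.map (·.1) := h
          rw [b1, List.map_map] at this
          obtain ⟨s', hs', heq⟩ := List.mem_map.mp this
          have : connP maps s' p :=
            (hroots s' p (s1 s' hs') hlandp).mp (by simpa using heq)
          exact hcov ⟨s', hs', this⟩
      have hgetD0 : d.getD r 0 = 0 := PySem.Dict.getD_of_not_contains d 0 hrfresh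
      have hpsump : psum maps proc p = 0 := by
        rw [psum]
        apply List.sum_eq_zero
        intro x hx
        obtain ⟨t, ht, rfl⟩ := List.mem_map.mp hx
        rw [if_neg]
        rintro ⟨hlt, hct⟩
        obtain ⟨s', hs', hc'⟩ := s3 t ht hlt
        exact hcov ⟨s', hs', connP_trans hc' (connP_symm hct)⟩
      refine ⟨seeds ++ [p], ?_, ?_, ?_, ?_, hb2, ?_, ?_⟩
      · intro s hs
        rcases List.mem_append.mp hs with hs | hs
        · exact s1 s hs
        · have : s = p := by simpa using hs
          exact this ▸ hlandp
      · rw [List.pairwise_append]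
        refine ⟨s2, List.pairwise_singleton _ _, ?_⟩
        intro s hs q hq
        have : q = p := by simpa using hq
        subst this
        exact fun hc => hcov ⟨s, hs, hc⟩
      · intro t ht hlt
        rcases List.mem_append.mp ht with ht | ht
        · obtain ⟨s', hs', hc'⟩ := s3 t ht hlt
          exact ⟨s', List.mem_append.mpr (Or.inl hs'), hc'⟩
        · have : t = p := by simpa using ht
          exact ⟨p, List.mem_append.mpr (Or.inr (by simp)), this ▸ Relation.EqvGen.refl p⟩
      · show stA.1 ++ [(bfsA maps stA.2 p.1 p.2).1] = _
        rw [List.map_append, a1, hb1, List.map_singleton]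
      · intro q hq1 hq2
        show visAt (bfsA maps stA.2 p.1 p.2).2 q = true ↔ _
        rw [hb3 q hq1 hq2]
        constructor
        · rintro (⟨s', hs', hc'⟩ | hc)
          · exact ⟨s', List.mem_append.mpr (Or.inl hs'), hc'⟩
          · exact ⟨p, List.mem_append.mpr (Or.inr (by simp)), hc⟩
        · rintro ⟨s', hs', hc'⟩
          rcases List.mem_append.mp hs' with hs' | hs'
          · exact Or.inl ⟨s', hs', hc'⟩
          · have : s' = p := by simpa using hs'
            exact Or.inr (this ▸ hc')
      · rw [stepB, if_pos hland, ← hrdef,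
          PySem.Dict.items_insert_of_not_contains d _ hrfresh, b1, hgetD0]
        rw [List.map_append, List.map_singleton]
        congr 1
        · apply List.map_congr_left
          intro s hs
          have hnc : ¬ connP maps s p := fun hc => hcov ⟨s, hs, hc⟩
          rw [psum_append, if_neg (fun hc => hnc hc.2), add_zero]
        · rw [psum_append, hpsump, if_pos ⟨hlandp, Relation.EqvGen.refl p⟩]
          show [(r, 0 + cellVal (gCell maps p.1 p.2))] = [(r, 0 + cellValN maps p)]
          rfl
  · -- water cell: both sides unchanged
    have hstA : stepA maps stA p = stA := by
      rw [stepA, if_neg (fun h => hland h.1)]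
    have hstB : stepB maps parent d p = d := by
      rw [stepB, if_neg hland]
    rw [hstA, hstB]
    refine ⟨seeds, s1, s2, ?_, a1, a2, a3, ?_⟩
    · intro t ht hlt
      rcases List.mem_append.mp ht with ht | ht
      · exact s3 t ht hlt
      · have : t = p := by simpa using ht
        subst this
        exact absurd hlt.2.2 (by simpa using hland)
    · rw [b1]
      apply List.map_congr_left
      intro s hs
      rw [psum_append, if_neg (fun hc => (by simpa using hland : ¬ _) hc.1.2.2), add_zero]

lemma masterFold (maps : List String) (parent : List Nat)
    (hroots : ∀ p q : Nat × Nat, landP maps p → landP maps q →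
      (ufFind parent (idx maps p) = ufFind parent (idx maps q) ↔ connP maps p q)) :
    ∀ (l : List (Nat × Nat)) (proc : List (Nat × Nat)) (stA : List Int × List (List Bool))
      (d : PySem.Dict Nat Int),
      (∀ p ∈ l, p.1 < maps.length ∧ p.2 < gCols maps) → InvJ maps parent proc stA d →
      InvJ maps parent (proc ++ l) (l.foldl (stepA maps) stA)
        (l.foldl (stepB maps parent) d) := by
  intro l
  induction l with
  | nil => intro proc stA d _ h; simpa using h
  | cons p t ih =>
    intro proc stA d hl hInv
    have h1 := masterStep maps parent hroots proc stA d (hl p List.mem_cons_self).1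
      (hl p List.mem_cons_self).2 hInv
    have h2 := ih (proc ++ [p]) _ _ (fun q hq => hl q (List.mem_cons_of_mem p hq)) h1
    simpa [List.append_assoc] using h2

lemma sum_map_range (n : Nat) (f : Nat → Int) :
    ((List.range n).map f).sum = ∑ x ∈ Finset.range n, f x := by
  induction n with
  | zero => simp
  | succ n ih => rw [List.range_succ, List.map_append, List.sum_append, ih,
      Finset.sum_range_succ, List.map_singleton, List.sum_singleton]

lemma cells_sum (maps : List String) (g : Nat × Nat → Int) :
    ((cellsList maps).map g).sum =
      ∑ p ∈ Finset.range maps.length ×ˢ Finset.range (gCols maps), g p := by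
  rw [Finset.sum_product, cellsList]
  induction maps.length with
  | zero => simp
  | succ R ih =>
    rw [List.range_succ, List.flatMap_append, List.map_append, List.sum_append, ih,
      Finset.sum_range_succ]
    congr 1
    rw [List.flatMap_cons, List.flatMap_nil, List.append_nil, List.map_map]
    exact sum_map_range (gCols maps) _

lemma psum_cellsList (maps : List String) {s : Nat × Nat} (hs : landP maps s) :
    psum maps (cellsList maps) s = compSum maps s := by
  letI : DecidablePred (connP maps s) := Classical.decPred _
  letI : DecidablePred (fun p => landP maps p ∧ connP maps s p) :=
    fun p => Classical.propDecidable _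
  have hfilter : compFin maps s =
      (Finset.range maps.length ×ˢ Finset.range (gCols maps)).filter
        (fun p => landP maps p ∧ connP maps s p) := by
    ext p
    rw [mem_compFin, Finset.mem_filter, Finset.mem_product, Finset.mem_range, Finset.mem_range]
    constructor
    · rintro ⟨h1, h2, h3⟩
      refine ⟨⟨h1, h2⟩, ?_, h3⟩
      rcases land_of_conn h3 with rfl | ⟨-, hl⟩
      · exact hs
      · exact hl
    · rintro ⟨⟨h1, h2⟩, -, h3⟩
      exact ⟨h1, h2, h3⟩
  rw [psum, cells_sum maps, compSum, hfilter, Finset.sum_filter]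

lemma visOK_replicate (maps : List String) :
    visOK maps (List.replicate maps.length (List.replicate (gCols maps) false)) := by
  refine ⟨List.length_replicate, fun row hrow => ?_⟩
  rw [List.eq_of_mem_replicate hrow]
  exact List.length_replicate

lemma visAt_replicate (maps : List String) (p : Nat × Nat) :
    visAt (List.replicate maps.length (List.replicate (gCols maps) false)) p = false := by
  simp only [visAt, getVis_natCast, List.getD_eq_getElem?_getD, List.getElem?_replicate]
  split_ifs <;> simp

lemma solution_eq_fold (maps : List String) :
    solution maps =
      (if 0 < ((cellsList maps).foldl (stepA maps)
          ([], List.replicate maps.length (List.replicate (gCols maps) false))).1.length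
       then PySem.List.sorted ((cellsList maps).foldl (stepA maps)
          ([], List.replicate maps.length (List.replicate (gCols maps) false))).1
          (fun x => x) false
       else [-1]) := by
  simp only [solution]
  rw [nested_foldl_eq maps.length (gCols maps)
    (fun (st : List Int × List (List Bool)) (i j : Nat) =>
      if gCell maps i j ≠ 'X' ∧ getVis st.2 i j = false then
        (st.1 ++ [(bfsA maps st.2 i j).1], (bfsA maps st.2 i j).2)
      else st)]
  rfl

lemma solution_alt_eq_fold (maps : List String) :
    solution_alt maps =
      (if ((cellsList maps).foldl
            (stepB maps (applyUnions (maps.length * gCols maps) (edgeList maps)))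
            PySem.Dict.empty).values ≠ []
       then PySem.List.sorted ((cellsList maps).foldl
            (stepB maps (applyUnions (maps.length * gCols maps) (edgeList maps)))
            PySem.Dict.empty).values (fun x => x) false
       else [-1]) := by
  simp only [solution_alt]
  rw [parentB_eq]
  rw [nested_foldl_eq maps.length (gCols maps)
    (fun (d : PySem.Dict Nat Int) (i j : Nat) =>
      if gCell maps i j ≠ 'X' then
        d.insert (ufFind (applyUnions (maps.length * gCols maps) (edgeList maps))
            (i * gCols maps + j))
          ((d.getD (ufFind (applyUnions (maps.length * gCols maps) (edgeList maps))
            (i * gCols maps + j)) 0) + cellVal (gCell maps i j))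
      else d)]
  rfl

theorem solution_eq_solution_alt (maps : List String) : solution maps = solution_alt maps := by
  rw [solution_eq_fold, solution_alt_eq_fold]
  have hroots := fun (p q : Nat × Nat) (hp : landP maps p) (hq : landP maps q) =>
    roots_iff maps hp hq
  have hInv0 : InvJ maps (applyUnions (maps.length * gCols maps) (edgeList maps)) []
      ([], List.replicate maps.length (List.replicate (gCols maps) false))
      PySem.Dict.empty := by
    refine ⟨[], by simp, by simp, by simp, rfl, visOK_replicate maps, ?_, rfl⟩
    intro p h1 h2
    rw [visAt_replicate]
    simp
  have hfin := masterFold maps _ hroots (cellsList maps) [] _ _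
    (fun p hp => mem_cellsList.mp hp) hInv0
  rw [List.nil_append] at hfin
  obtain ⟨seeds, s1, s2, s3, a1, a2, a3, b1⟩ := hfin
  have hvals : ((cellsList maps).foldl
      (stepB maps (applyUnions (maps.length * gCols maps) (edgeList maps)))
      PySem.Dict.empty).values = seeds.map (compSum maps) := by
    show (((cellsList maps).foldl
      (stepB maps (applyUnions (maps.length * gCols maps) (edgeList maps)))
      PySem.Dict.empty).items).map (·.2) = _
    rw [b1, List.map_map]
    apply List.map_congr_left
    intro s hs
    exact psum_cellsList maps (s1 s hs)
  rw [a1, hvals]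
  by_cases hseeds : seeds = []
  · subst hseeds
    simp
  · rw [if_pos (by simpa using List.length_pos_of_ne_nil (fun h => hseeds (by simpa using h))),
      if_pos (by simp [hseeds])]

-- ===== VERDICT (by name: the statement is the Claim_ definition above) =====
theorem solution_spec : Claim_equal_solution := by
  intro maps _ _
  exact solution_eq_solution_alt maps
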